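-- pv_equiv track=rewrite | github.com/emomon23/PythonChallenge | HttpService.py | __chunkUrlList__
-- ===== SOURCE A (Python) =====
-- def __chunkUrlList__(bigListOfUrls):
--     result = [];
--     innerList = []
--     for url in bigListOfUrls:
--         innerList.append(url)
--         if len(innerList) == 10:
--             result.append(innerList)
--             innerList = []
--
--     if (len(innerList) > 0):
--         result.append(innerList)
--
--     return result;
-- ===== SOURCE B (Python) =====
-- def __chunkUrlList__(bigListOfUrls):
--     return [bigListOfUrls[i:i + 10] for i in range(0, len(bigListOfUrls), 10)]
-- ===== Notes on version B (the rewrite author's own statement) =====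
-- stated objective: simpler
-- what changed: Replaces the per-element accumulate-and-flush loop (inner buffer plus trailing remainder check) with a one-line comprehension that steps indices by 10 and slices each contiguous block, so the partial final chunk falls out of slice clamping with no special guard.
import Mathlib
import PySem

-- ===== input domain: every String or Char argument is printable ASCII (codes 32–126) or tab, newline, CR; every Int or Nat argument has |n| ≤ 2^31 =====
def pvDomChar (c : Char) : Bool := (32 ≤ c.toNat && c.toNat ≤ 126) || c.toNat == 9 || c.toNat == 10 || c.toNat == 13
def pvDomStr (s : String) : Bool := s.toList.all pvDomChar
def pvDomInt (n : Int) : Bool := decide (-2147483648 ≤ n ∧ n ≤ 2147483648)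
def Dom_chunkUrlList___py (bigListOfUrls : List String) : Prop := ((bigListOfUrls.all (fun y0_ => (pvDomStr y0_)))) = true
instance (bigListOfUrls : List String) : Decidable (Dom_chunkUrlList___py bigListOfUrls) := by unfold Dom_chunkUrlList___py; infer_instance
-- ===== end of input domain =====

-- B replaces A's accumulate-and-flush loop with an index-stepping slice comprehension (simpler decomposition, same O(n) work).


-- ===== PORT A =====
-- one loop step of A: append url to innerList, flush it into result when it reaches 10
def pvStepA (st : List (List String) × List String) (url : String) : List (List String) × List String :=
  let inner := st.2 ++ [url]
  if inner.length = 10 then (st.1 ++ [inner], []) else (st.1, inner)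

def chunkUrlList___py (bigListOfUrls : List String) : List (List String) :=
  let st := bigListOfUrls.foldl pvStepA ([], [])
  if st.2.length > 0 then st.1 ++ [st.2] else st.1

-- ===== PORT B =====
def chunkUrlList___py_alt (bigListOfUrls : List String) : List (List String) :=
  (PySem.List.pyRange 0 (bigListOfUrls.length : Int) 10).map
    (fun i => PySem.List.slice bigListOfUrls (some i) (some (i + 10)))

-- ===== PRECONDITION & SPEC =====
def Spec_chunkUrlList___py (bigListOfUrls : List String) (out : List (List String)) : Prop := out = chunkUrlList___py_alt bigListOfUrls
instance (bigListOfUrls : List String) (out : List (List String)) : Decidable (Spec_chunkUrlList___py bigListOfUrls out) := by unfold Spec_chunkUrlList___py; infer_instance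

-- ===== CLAIM (what is proved, stated in full; the proofs are below) =====
def Claim_equal_chunkUrlList___py : Prop := ∀ (bigListOfUrls : List String), Dom_chunkUrlList___py bigListOfUrls → Spec_chunkUrlList___py bigListOfUrls (chunkUrlList___py bigListOfUrls)

-- ===== LEMMAS AND PROOFS =====

-- reference form both ports are reduced to: successive blocks of 10
def pvChunks (xs : List String) : List (List String) :=
  if xs = [] then [] else xs.take 10 :: pvChunks (xs.drop 10)
termination_by xs.length
decreasing_by
  have : 0 < xs.length := List.length_pos_of_ne_nil (by assumption)
  simp; omega

lemma pvA_loop : ∀ (xs : List String) (res : List (List String)) (inner : List String),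
    inner.length < 10 →
    (let st := xs.foldl pvStepA (res, inner)
     if st.2.length > 0 then st.1 ++ [st.2] else st.1) = res ++ pvChunks (inner ++ xs) := by
  intro xs
  induction xs with
  | nil =>
    intro res inner h
    simp only [List.foldl_nil, List.append_nil]
    by_cases hi : inner = []
    · subst hi; simp [pvChunks]
    · rw [pvChunks, if_neg hi]
      have hl : 0 < inner.length := List.length_pos_of_ne_nil hi
      have ht : inner.take 10 = inner := List.take_of_length_le (by omega)
      have hd : inner.drop 10 = [] := List.drop_eq_nil_of_le (by omega)
      simp [hl, ht, hd, pvChunks]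
  | cons u t ih =>
    intro res inner h
    simp only [List.foldl_cons]
    show (let st := t.foldl pvStepA (pvStepA (res, inner) u); _) = _
    by_cases hten : (inner ++ [u]).length = 10
    · have hstep : pvStepA (res, inner) u = (res ++ [inner ++ [u]], []) := by
        simp [pvStepA, hten]
      rw [hstep, ih (res ++ [inner ++ [u]]) [] (by simp)]
      have ht10 : ((inner ++ [u]) ++ t).take 10 = inner ++ [u] := by
        rw [List.take_append_of_le_length (by omega), List.take_of_length_le (by omega)]
      have hd10 : ((inner ++ [u]) ++ t).drop 10 = t := by
        rw [List.drop_append_of_le_length (by omega)]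
        simp at hten ⊢
        omega
      have hR : pvChunks ((inner ++ [u]) ++ t) = (inner ++ [u]) :: pvChunks t := by
        conv_lhs => rw [pvChunks]
        rw [if_neg (by simp), ht10, hd10]
      rw [show inner ++ u :: t = (inner ++ [u]) ++ t by simp, hR]
      simp
    · have hstep : pvStepA (res, inner) u = (res, inner ++ [u]) := by
        unfold pvStepA; rw [if_neg hten]
      rw [hstep, ih res (inner ++ [u])
        (by simp only [List.length_append, List.length_cons, List.length_nil] at hten ⊢; omega)]
      simp

lemma pvA_eq_chunks (xs : List String) : chunkUrlList___py xs = pvChunks xs := by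
  have := pvA_loop xs [] [] (by simp)
  simpa [chunkUrlList___py] using this

lemma pvRange_ten_nil (a b : Int) (h : b ≤ a) : PySem.List.pyRange a b 10 = [] := by
  rw [PySem.List.pyRange_of_pos a b (by norm_num)]
  simp [if_neg (not_lt.2 h)]

lemma pvRange_ten_cons (a b : Int) (h : a < b) :
    PySem.List.pyRange a b 10 = a :: PySem.List.pyRange (a + 10) b 10 := by
  rw [PySem.List.pyRange_of_pos a b (by norm_num),
      PySem.List.pyRange_of_pos (a + 10) b (by norm_num)]
  rw [if_pos h]
  by_cases h2 : a + 10 < b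
  · rw [if_pos h2]
    have hc : ((b - a + 10 - 1) / 10).toNat = ((b - (a + 10) + 10 - 1) / 10).toNat + 1 := by
      omega
    rw [hc, List.range_succ_eq_map]
    simp only [List.map_cons, List.map_map]
    congr 1
    · simp
    · apply List.map_congr_left
      intro k _
      simp [Function.comp, Nat.succ_eq_add_one]
      ring
  · rw [if_neg h2]
    have hc : ((b - a + 10 - 1) / 10).toNat = 1 := by omega
    rw [hc]
    simp [List.range_succ]

lemma pvRange_ten_shift (b : Int) :
    PySem.List.pyRange 10 b 10 = (PySem.List.pyRange 0 (b - 10) 10).map (· + 10) := by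
  rw [PySem.List.pyRange_of_pos 10 b (by norm_num),
      PySem.List.pyRange_of_pos 0 (b - 10) (by norm_num)]
  have hiff : (10 : Int) < b ↔ 0 < b - 10 := by omega
  by_cases h : (10 : Int) < b
  · rw [if_pos h, if_pos (hiff.1 h)]
    simp only [sub_zero, List.map_map]
    apply List.map_congr_left
    intro k _
    simp [Function.comp]
    ring
  · rw [if_neg h, if_neg (fun hc => h (hiff.2 hc))]
    simp

lemma pvSlice_shift (xs : List String) (i : Int) (hi : 0 ≤ i) :
    PySem.List.slice xs (some (i + 10)) (some (i + 10 + 10)) =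
    PySem.List.slice (xs.drop 10) (some i) (some (i + 10)) := by
  obtain ⟨j, rfl⟩ : ∃ j : Nat, i = (j : Int) := ⟨i.toNat, (Int.toNat_of_nonneg hi).symm⟩
  have h2 : (j : Int) + 10 + 10 = ((j + 10 : Nat) : Int) + ((10 : Nat) : Int) := by push_cast; ring
  have h1 : (j : Int) + 10 = ((j + 10 : Nat) : Int) := by push_cast; ring
  rw [h2, h1, PySem.List.slice_natCast_add,
      show ((j + 10 : Nat) : Int) = (j : Int) + ((10 : Nat) : Int) from by push_cast; ring,
      PySem.List.slice_natCast_add, List.drop_drop, Nat.add_comm 10 j]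

lemma pvB_eq_chunks : ∀ (n : Nat) (xs : List String), xs.length ≤ n →
    chunkUrlList___py_alt xs = pvChunks xs := by
  intro n
  induction n with
  | zero =>
    intro xs hx
    have : xs = [] := List.eq_nil_of_length_eq_zero (by omega)
    subst this
    simp [chunkUrlList___py_alt, pvChunks, pvRange_ten_nil 0 0 le_rfl]
  | succ n ih =>
    intro xs hx
    by_cases hnil : xs = []
    · subst hnil
      simp [chunkUrlList___py_alt, pvChunks, pvRange_ten_nil 0 0 le_rfl]
    · have hpos : 0 < xs.length := List.length_pos_of_ne_nil hnil
      unfold chunkUrlList___py_alt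
      rw [pvRange_ten_cons 0 (xs.length : Int) (by exact_mod_cast hpos)]
      rw [pvChunks, if_neg hnil]
      simp only [List.map_cons, zero_add]
      congr 1
      · -- head: xs[0:10] = take 10
        rw [PySem.List.slice_zero_start,
            show (10 : Int) = ((10 : Nat) : Int) from by norm_num,
            PySem.List.slice_to_natCast]
      · -- tail
        rw [pvRange_ten_shift, List.map_map]
        have hmap : ∀ i ∈ PySem.List.pyRange 0 ((xs.length : Int) - 10) 10,
            ((fun i => PySem.List.slice xs (some i) (some (i + 10))) ∘ (· + 10)) i =
            (fun i => PySem.List.slice (xs.drop 10) (some i) (some (i + 10))) i := by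
          intro i hi
          have h0 : 0 ≤ i := ((PySem.List.mem_pyRange_iff_of_pos (by norm_num) i).1 hi).1
          exact pvSlice_shift xs i h0
        rw [List.map_congr_left hmap]
        by_cases h10 : 10 ≤ xs.length
        · have hlen : ((xs.drop 10).length : Int) = (xs.length : Int) - 10 := by
            simp; omega
          rw [← hlen]
          have := ih (xs.drop 10) (by simp; omega)
          unfold chunkUrlList___py_alt at this
          exact this
        · have hd : xs.drop 10 = [] := List.drop_eq_nil_of_le (by omega)
          rw [hd]
          rw [pvRange_ten_nil 0 ((xs.length : Int) - 10) (by omega)]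
          simp [pvChunks]

-- ===== VERDICT (by name: the statement is the Claim_ definition above) =====
theorem chunkUrlList___py_spec : Claim_equal_chunkUrlList___py := by
  intro xs _
  show chunkUrlList___py xs = chunkUrlList___py_alt xs
  rw [pvA_eq_chunks, pvB_eq_chunks xs.length xs le_rfl]
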